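-- pv_equiv track=rewrite | github.com/brentscheidt/platinumroofingaz-website-redesign | tools/mirror_site.py | allowed_asset_host
-- ===== SOURCE A (Python) =====
-- from typing import Dict, Iterable, Set, Tuple
--
-- def allowed_asset_host(host: str, site_hosts: Set[str]) -> bool:
--     host = host.lower()
--     if host in site_hosts:
--         return True
--     trusted_suffixes = (
--         "squarespace.com",
--         "squarespace-cdn.com",
--         "googleapis.com",
--         "gstatic.com",
--         "cloudfront.net",
--     )
--     return any(host == suffix or host.endswith("." + suffix) for suffix in trusted_suffixes)
-- ===== SOURCE B (Python) =====
-- def allowed_asset_host(host, site_hosts):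
--     host = host.lower()
--     if host in site_hosts:
--         return True
--     trusted = {
--         "squarespace.com",
--         "squarespace-cdn.com",
--         "googleapis.com",
--         "gstatic.com",
--         "cloudfront.net",
--     }
--     if host in trusted:
--         return True
--     for i, ch in enumerate(host):
--         if ch == '.' and host[i + 1:] in trusted:
--             return True
--     return False
-- ===== Notes on version B (the rewrite author's own statement) =====
-- stated objective: alternative
-- what changed: B replaces the per-pattern endswith scan over the five trusted suffixes by a single pass over the host's dot positions, testing each after-dot tail (and the whole host) for membership in a trusted set.
import Mathlib
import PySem

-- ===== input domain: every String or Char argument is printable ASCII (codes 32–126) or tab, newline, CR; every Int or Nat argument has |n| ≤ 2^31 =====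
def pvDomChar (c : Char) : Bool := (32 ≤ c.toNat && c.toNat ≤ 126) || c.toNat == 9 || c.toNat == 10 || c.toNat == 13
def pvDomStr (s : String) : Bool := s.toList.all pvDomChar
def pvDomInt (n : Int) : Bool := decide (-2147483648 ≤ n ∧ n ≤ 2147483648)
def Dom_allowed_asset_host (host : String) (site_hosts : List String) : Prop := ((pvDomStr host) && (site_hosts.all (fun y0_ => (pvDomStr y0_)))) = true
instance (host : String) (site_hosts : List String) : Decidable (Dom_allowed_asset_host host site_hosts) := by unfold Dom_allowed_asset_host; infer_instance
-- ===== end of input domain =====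

-- B replaces the per-pattern endswith scan over the five trusted suffixes by one pass over the
-- host's dot positions, testing each after-dot tail (and the whole host) against a trusted set
-- (objective: alternative; same observable behaviour, no speed claim).

-- ===== PORT A =====
def allowed_asset_host (host : String) (site_hosts : List String) : Bool :=
  let h := PySem.Str.lower host
  if site_hosts.contains h then true
  else
    ["squarespace.com", "squarespace-cdn.com", "googleapis.com", "gstatic.com", "cloudfront.net"].any
      (fun suffix => h == suffix || PySem.Str.endswith h ("." ++ suffix))

-- ===== PORT B =====
-- the Python set literal `trusted` of Source B
def pvTrusted : PySem.Set String :=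
  PySem.Set.ofList
    ["squarespace.com", "squarespace-cdn.com", "googleapis.com", "gstatic.com", "cloudfront.net"]

def allowed_asset_host_alt (host : String) (site_hosts : List String) : Bool :=
  let h := PySem.Str.lower host
  if site_hosts.contains h then true
  else if pvTrusted.contains h then true
  else
    -- `for i, ch in enumerate(host): if ch == '.' and host[i+1:] in trusted: return True`
    (PySem.List.enumerate h.toList 0).any
      (fun p => p.2 == '.' && pvTrusted.contains (PySem.Str.slice h (some (p.1 + 1)) none))

-- ===== PRECONDITION & SPEC =====
def Spec_allowed_asset_host (host : String) (site_hosts : List String) (out : Bool) : Prop := out = allowed_asset_host_alt host site_hosts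
instance (host : String) (site_hosts : List String) (out : Bool) : Decidable (Spec_allowed_asset_host host site_hosts out) := by unfold Spec_allowed_asset_host; infer_instance

-- ===== CLAIM (what is proved, stated in full; the proofs are below) =====
def Claim_equal_allowed_asset_host : Prop := ∀ (host : String) (site_hosts : List String), Dom_allowed_asset_host host site_hosts → Spec_allowed_asset_host host site_hosts (allowed_asset_host host site_hosts)

-- ===== LEMMAS AND PROOFS =====

-- a dotted suffix '.'++s sits at the end of L iff some position k holds '.' and the tail after it is s
lemma dot_suffix_iff (L s : List Char) :
    ('.' :: s) <:+ L ↔ ∃ k, ∃ _ : k < L.length, L[k] = '.' ∧ L.drop (k + 1) = s := by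
  constructor
  · rintro ⟨p, rfl⟩
    refine ⟨p.length, by simp, ?_, ?_⟩
    · simp
    · rw [List.append_cons, show p.length + 1 = (p ++ ['.']).length by simp]
      exact List.drop_left
  · rintro ⟨k, hk, hget, hdrop⟩
    refine ⟨L.take k, ?_⟩
    conv_rhs => rw [← List.take_append_drop k L]
    congr 1
    rw [List.drop_eq_getElem_cons hk, hget, hdrop]

-- the core equivalence between A's suffix scan and B's dot-position scan, for any host string h
lemma scan_eq (h : String) :
    (["squarespace.com", "squarespace-cdn.com", "googleapis.com", "gstatic.com", "cloudfront.net"].any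
      (fun suffix => h == suffix || PySem.Str.endswith h ("." ++ suffix)))
    = (pvTrusted.contains h
       || (PySem.List.enumerate h.toList 0).any
            (fun p => p.2 == '.' && pvTrusted.contains (PySem.Str.slice h (some (p.1 + 1)) none))) := by
  have hT : pvTrusted =
      ["squarespace.com", "squarespace-cdn.com", "googleapis.com", "gstatic.com", "cloudfront.net"] := by
    decide
  have hsl : ∀ (k : Nat),
      (PySem.Str.slice h (some ((0 + (k:Int)) + 1)) none).toList = h.toList.drop (k + 1) := by
    intro k
    rw [PySem.Str.toList_slice]
    have : (0 + (k:Int)) + 1 = ((k + 1 : Nat) : Int) := by push_cast; ring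
    rw [this, PySem.Chars.slice_eq_listSlice, PySem.List.slice_from_natCast]
  rw [Bool.eq_iff_iff]
  simp only [List.any_eq_true, Bool.or_eq_true, beq_iff_eq, PySem.Str.endswith_eq,
    PySem.Set.contains_iff, hT, Bool.and_eq_true, PySem.List.mem_enumerate_iff]
  constructor
  · rintro ⟨s, hmem, hcase⟩
    rcases hcase with rfl | hend
    · exact Or.inl hmem
    · rw [show ("." ++ s).toList = '.' :: s.toList by simp] at hend
      rw [PySem.Chars.endswith_iff, dot_suffix_iff] at hend
      obtain ⟨k, hk, hget, hdrop⟩ := hend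
      refine Or.inr ⟨(0 + (k:Int), '.'), ⟨k, hk, by simp [hget]⟩, rfl, ?_⟩
      show PySem.Str.slice h (some ((0 + (k:Int)) + 1)) none ∈ _
      have he : PySem.Str.slice h (some ((0 + (k:Int)) + 1)) none = s := by
        rw [← String.toList_inj, hsl k, hdrop]
      rw [he]; exact hmem
  · rintro (hmem | ⟨p, ⟨k, hk, rfl⟩, hdot, hin⟩)
    · exact ⟨h, hmem, Or.inl rfl⟩
    · have hin' : PySem.Str.slice h (some ((0 + (k:Int)) + 1)) none ∈
          (["squarespace.com", "squarespace-cdn.com", "googleapis.com", "gstatic.com", "cloudfront.net"] : List String) := hin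
      have hdot' : h.toList[k] = '.' := by simpa using hdot
      refine ⟨_, hin', Or.inr ?_⟩
      rw [show ("." ++ PySem.Str.slice h (some ((0 + (k:Int)) + 1)) none).toList
            = '.' :: (PySem.Str.slice h (some ((0 + (k:Int)) + 1)) none).toList by simp,
        PySem.Chars.endswith_iff, dot_suffix_iff]
      exact ⟨k, hk, hdot', (hsl k).symm⟩

-- ===== VERDICT (by name: the statement is the Claim_ definition above) =====
theorem allowed_asset_host_spec : Claim_equal_allowed_asset_host := by
  intro host site_hosts _
  unfold Spec_allowed_asset_host allowed_asset_host allowed_asset_host_alt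
  by_cases hc : site_hosts.contains (PySem.Str.lower host) = true
  · rw [if_pos hc, if_pos hc]
  · rw [if_neg hc, if_neg hc, scan_eq]
    by_cases ht : pvTrusted.contains (PySem.Str.lower host) = true
    · rw [if_pos ht, ht, Bool.true_or]
    · rw [if_neg ht, (Bool.not_eq_true _).mp ht, Bool.false_or]
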